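-- pv_equiv track=rewrite | github.com/rookiye/ee641-group9-final | src/evaluation/evaluate_ranking.py | rank_products
-- ===== SOURCE A (Python) =====
-- def rank_products(text, product_names):
--     """Rank products by position in text."""
--     position_dict = {}
--     for name in product_names:
--         pos = text.find(name)
--         position_dict[name] = pos if pos != -1 else float('inf')
--     sorted_products = sorted(position_dict, key=position_dict.get)
--     ranks = {}
--     for i, prod in enumerate(sorted_products):
--         ranks[prod] = i + 1 if position_dict[prod] != float('inf') else len(sorted_products) + 1
--     return ranks
-- ===== SOURCE B (Python) =====
-- def rank_products(text, product_names):
--     """Rank products by position in text.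
--
--     One left-to-right sweep over text positions: at each position the still
--     unseen names that start there are appended to `found` (so `found` ends up
--     ordered by first occurrence, ties in original order); names never seen get
--     the sentinel rank len(names) + 1.
--     """
--     names = list(dict.fromkeys(product_names))
--     found = []
--     remaining = names
--     for j in range(len(text) + 1):
--         if not remaining:
--             break
--         still = []
--         for n in remaining:
--             if text.startswith(n, j):
--                 found.append(n)
--             else:
--                 still.append(n)
--         remaining = still
--     ranks = {}
--     for r, n in enumerate(found, 1):
--         ranks[n] = r
--     sentinel = len(names) + 1
--     for n in remaining:
--         ranks[n] = sentinel
--     return ranks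
-- ===== Notes on version B (the rewrite author's own statement) =====
-- stated objective: alternative
-- what changed: A computes text.find(name) for every name and then stable-sorts the names by position with a float('inf') sentinel; B makes one left-to-right sweep over text positions, appending each still-pending name to the found list at the first position where it starts, so the ranking order falls out of the sweep with no sort and no sentinel (same worst-case asymptotics; in wall time the interpreted sweep is slower than A's C-level str.find).
import Mathlib
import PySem

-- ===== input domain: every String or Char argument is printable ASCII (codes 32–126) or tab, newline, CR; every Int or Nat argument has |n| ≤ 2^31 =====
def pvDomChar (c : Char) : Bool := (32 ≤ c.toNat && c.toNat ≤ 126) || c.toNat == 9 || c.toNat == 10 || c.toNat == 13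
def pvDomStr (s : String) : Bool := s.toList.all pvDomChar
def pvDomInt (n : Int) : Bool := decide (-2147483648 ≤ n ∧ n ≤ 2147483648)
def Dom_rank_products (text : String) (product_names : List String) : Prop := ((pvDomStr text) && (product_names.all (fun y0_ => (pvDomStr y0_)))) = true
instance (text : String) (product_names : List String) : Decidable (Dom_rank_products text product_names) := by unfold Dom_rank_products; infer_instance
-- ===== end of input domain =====

-- B replaces A's per-name substring search + stable sort by one left-to-right sweep over text
-- positions that discovers the names directly in rank order (objective: alternative — same
-- worst-case asymptotics, no sort/sentinel; the interpreted sweep is slower in wall time than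
-- A's C-level str.find on large texts).

-- ===== PORT A =====
-- float('inf') is used by A only as a sentinel comparing above every int position: it is modelled
-- as `none : Option Int`, and Python's int-vs-inf comparison as the exact lexicographic
-- (is-inf flag, value) tuple key of PySem.List.sorted2.
def rank_products (text : String) (product_names : List String) : List (String × Int) :=
  let position_dict : PySem.Dict String (Option Int) :=
    product_names.foldl (fun d name =>
      let pos := PySem.Str.find text name
      d.insert name (if pos ≠ -1 then some pos else none)) PySem.Dict.empty
  -- sorted(position_dict, key=position_dict.get): every element is a key, so .get is its value
  let sorted_products := PySem.List.sorted2 position_dict.keys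
      (fun n => if position_dict.getD n none = none then (1 : Int) else 0)
      (fun n => (position_dict.getD n none).getD 0) false
  let ranks : PySem.Dict String Int :=
    (PySem.List.enumerate sorted_products 0).foldl (fun r p =>
      r.insert p.2 (if position_dict.getD p.2 none ≠ none then p.1 + 1 else (sorted_products.length : Int) + 1))
      PySem.Dict.empty
  ranks.items

-- ===== PORT B =====
-- text.startswith(n, j) with 0 ≤ j ≤ len(text) is exactly: n.toList is a prefix of text.toList.drop j;
-- the scan runs over range(len(text)+1) with Source B's 'if not remaining: break' early exit.
def altScan (tl : List Char) : List Nat → (List String × List String) → (List String × List String)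
  | [], st => st
  | j :: js, st =>
      if st.2 = [] then st
      else altScan tl js
        (st.2.foldl (fun acc n =>
          if PySem.Chars.startswith (List.drop j tl) n.toList then (acc.1 ++ [n], acc.2)
          else (acc.1, acc.2 ++ [n])) (st.1, []))

def rank_products_alt (text : String) (product_names : List String) : List (String × Int) :=
  let names := PySem.List.dedup product_names
  let st := altScan text.toList (List.range (text.toList.length + 1)) ([], names)
  let ranks : PySem.Dict String Int :=
    (PySem.List.enumerate st.1 1).foldl (fun d p => d.insert p.2 p.1) PySem.Dict.empty
  let sentinel : Int := (names.length : Int) + 1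
  (st.2.foldl (fun d n => d.insert n sentinel) ranks).items

-- ===== PRECONDITION & SPEC =====
def Spec_rank_products (text : String) (product_names : List String) (out : List (String × Int)) : Prop := out = rank_products_alt text product_names
instance (text : String) (product_names : List String) (out : List (String × Int)) : Decidable (Spec_rank_products text product_names out) := by unfold Spec_rank_products; infer_instance

-- ===== CLAIM (what is proved, stated in full; the proofs are below) =====
def Claim_equal_rank_products : Prop := ∀ (text : String) (product_names : List String), Dom_rank_products text product_names → Spec_rank_products text product_names (rank_products text product_names)

-- ===== LEMMAS AND PROOFS =====

-- first occurrence of n in tl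
def fdv (tl : List Char) (n : String) : Int := PySem.Chars.find tl n.toList
-- position key with the sentinel flattened to length+1
def pval (tl : List Char) (n : String) : Int := if fdv tl n ≠ -1 then fdv tl n else (tl.length : Int) + 1
-- original index of n in the deduplicated name list
def idxv (names : List String) (n : String) : Int := (names.idxOf n : Int)
-- single integer key realising the lexicographic (position, original index) order
def key2 (tl : List Char) (names : List String) (n : String) : Int :=
  pval tl n * ((names.length : Int) + 1) + idxv names n
-- names discovered before position k, in discovery order
def Fnd (tl : List Char) (names : List String) (k : Nat) : List String :=
  (List.range k).flatMap (fun (j : Nat) => names.filter (fun n => decide (fdv tl n = (j : Int))))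
-- names still pending at position k
def Rem (tl : List Char) (names : List String) (k : Nat) : List String :=
  names.filter (fun n => decide (fdv tl n = -1 ∨ (k : Int) ≤ fdv tl n))

-- dict built by inserting a key-determined value for every list element
theorem getD_foldl_insert_valfun {ν : Type} (l : List String) (g : String → ν) (dflt : ν) :
    ∀ (d : PySem.Dict String ν) (n : String),
      (l.foldl (fun d x => d.insert x (g x)) d).getD n dflt = if n ∈ l then g n else d.getD n dflt := by
  induction l with
  | nil => intro d n; simp
  | cons x t ih =>
      intro d n
      simp only [List.foldl_cons, ih, List.mem_cons]
      by_cases hmem : n ∈ t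
      · simp [hmem]
      · by_cases hx : n = x
        · subst hx; simp [hmem, PySem.Dict.getD_insert_self]
        · simp [hmem, hx, PySem.Dict.getD_insert_of_ne _ _ _ hx]

theorem insertBy_congr {α : Type} (b1 b2 : α → α → Bool) (x : α) (acc : List α)
    (h : ∀ y ∈ acc, b1 x y = b2 x y) :
    PySem.List.insertBy b1 x acc = PySem.List.insertBy b2 x acc := by
  induction acc with
  | nil => rfl
  | cons y ys ih =>
      have hy := h y (by simp)
      simp only [PySem.List.insertBy, hy]
      by_cases hb : b2 x y = true
      · simp [hb]
      · simp only [Bool.not_eq_true] at hb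
        simp [hb, ih (fun z hz => h z (by simp [hz]))]

theorem foldl_insertBy_congr {α : Type} (b1 b2 : α → α → Bool) :
    ∀ (l : List α) (acc : List α),
      (∀ x ∈ l, ∀ y ∈ acc, b1 x y = b2 x y) →
      l.Pairwise (fun y x => b1 x y = b2 x y) →
      l.foldl (fun acc x => PySem.List.insertBy b1 x acc) acc
        = l.foldl (fun acc x => PySem.List.insertBy b2 x acc) acc := by
  intro l
  induction l with
  | nil => intro acc _ _; rfl
  | cons x t ih =>
      intro acc hacc hpw
      simp only [List.foldl_cons]
      rw [insertBy_congr b1 b2 x acc (fun y hy => hacc x (by simp) y hy)]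
      apply ih
      · intro z hz y hy
        rcases (PySem.List.mem_insertBy _ _ _ _).1 hy with h1 | h1
        · subst h1
          exact (List.pairwise_cons.1 hpw).1 z hz
        · exact hacc z (by simp [hz]) y h1
      · exact (List.pairwise_cons.1 hpw).2

-- the inner for-loop of the scan is a partition
theorem foldl_partition (c : String → Bool) :
    ∀ (l : List String) (f0 s0 : List String),
      l.foldl (fun acc n => if c n then (acc.1 ++ [n], acc.2) else (acc.1, acc.2 ++ [n])) (f0, s0)
        = (f0 ++ l.filter c, s0 ++ l.filter (fun n => !c n)) := by
  intro l
  induction l with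
  | nil => intro f0 s0; simp
  | cons x t ih =>
      intro f0 s0
      simp only [List.foldl_cons]
      by_cases hc : c x = true
      · simp [hc, ih]
      · simp only [Bool.not_eq_true] at hc
        simp [hc, ih]

-- startswith at position a ↔ the first occurrence is exactly a, for pending names
theorem startswith_iff_fdv_eq (tl : List Char) (n : String) (a : Nat)
    (hp : (a : Int) ≤ fdv tl n) :
    PySem.Chars.startswith (List.drop a tl) n.toList = true ↔ fdv tl n = (a : Int) := by
  unfold fdv at hp ⊢
  constructor
  · intro hsw
    have hpre : n.toList <+: List.drop a tl := (PySem.Chars.startswith_iff _ _).1 hsw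
    have hinf : n.toList <:+: tl := hpre.isInfix.trans (List.drop_suffix a tl).isInfix
    have hne : PySem.Chars.find tl n.toList ≠ -1 := (PySem.Chars.find_ne_neg_one_iff tl n.toList).2 hinf
    have h0 : 0 ≤ PySem.Chars.find tl n.toList := by
      have := PySem.Chars.neg_one_le_find tl n.toList; omega
    have hspec := PySem.Chars.find_spec (s := tl) (sub := n.toList) h0
    by_contra hne2
    have hlt : a < (PySem.Chars.find tl n.toList).toNat := by omega
    exact hspec.2 a hlt hpre
  · intro heq
    have h0 : 0 ≤ PySem.Chars.find tl n.toList := by omega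
    have hspec := PySem.Chars.find_spec (s := tl) (sub := n.toList) h0
    have hta : (PySem.Chars.find tl n.toList).toNat = a := by omega
    rw [hta] at hspec
    exact (PySem.Chars.startswith_iff _ _).2 hspec.1

theorem startswith_false_of_fdv_neg (tl : List Char) (n : String) (a : Nat)
    (h : fdv tl n = -1) :
    PySem.Chars.startswith (List.drop a tl) n.toList = false := by
  cases hb : PySem.Chars.startswith (List.drop a tl) n.toList with
  | false => rfl
  | true =>
    exfalso
    have hpre : n.toList <+: List.drop a tl := (PySem.Chars.startswith_iff _ _).1 hb
    have hinf : n.toList <:+: tl := hpre.isInfix.trans (List.drop_suffix a tl).isInfix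
    exact ((PySem.Chars.find_ne_neg_one_iff tl n.toList).2 hinf) h

theorem fdv_le_length (tl : List Char) (n : String) (h : fdv tl n ≠ -1) :
    0 ≤ fdv tl n ∧ fdv tl n ≤ (tl.length : Int) := by
  refine ⟨?_, PySem.Chars.find_le_length tl n.toList⟩
  have := PySem.Chars.neg_one_le_find tl n.toList
  unfold fdv at h ⊢
  omega

-- one scan step: the names starting exactly at position a
theorem filter_start_eq (tl : List Char) (names : List String) (a : Nat) :
    (Rem tl names a).filter (fun n => PySem.Chars.startswith (List.drop a tl) n.toList)
      = names.filter (fun n => decide (fdv tl n = (a : Int))) := by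
  unfold Rem
  rw [List.filter_filter]
  apply List.filter_congr
  intro n _
  by_cases h1 : fdv tl n = -1
  · have hsw := startswith_false_of_fdv_neg tl n a h1
    have hne : ¬ (fdv tl n = (a : Int)) := by omega
    simp [hsw, hne]
  · by_cases h2 : (a : Int) ≤ fdv tl n
    · have hiff := startswith_iff_fdv_eq tl n a h2
      cases hsw : PySem.Chars.startswith (List.drop a tl) n.toList with
      | true => simp [hiff.1 hsw]
      | false =>
        have hne : ¬ (fdv tl n = (a : Int)) := fun h => by rw [hiff.2 h] at hsw; cases hsw
        simp [hne]
    · have hne : ¬ (fdv tl n = (a : Int)) := by omega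
      simp [h1, h2, hne]

theorem filter_nostart_eq (tl : List Char) (names : List String) (a : Nat) :
    (Rem tl names a).filter (fun n => !PySem.Chars.startswith (List.drop a tl) n.toList)
      = Rem tl names (a + 1) := by
  unfold Rem
  rw [List.filter_filter]
  apply List.filter_congr
  intro n _
  by_cases h1 : fdv tl n = -1
  · have hsw := startswith_false_of_fdv_neg tl n a h1
    simp [hsw, h1]
  · by_cases h2 : (a : Int) ≤ fdv tl n
    · have hiff := startswith_iff_fdv_eq tl n a h2
      cases hsw : PySem.Chars.startswith (List.drop a tl) n.toList with
      | true =>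
        have hfa := hiff.1 hsw
        simp only [Bool.not_true, Bool.false_and]
        symm
        rw [decide_eq_false_iff_not]
        push_cast
        omega
      | false =>
        have hne : ¬ (fdv tl n = (a : Int)) := fun h => by rw [hiff.2 h] at hsw; cases hsw
        simp only [Bool.not_false, Bool.true_and]
        rw [decide_eq_decide]
        push_cast
        omega
    · have h4 : ¬ (fdv tl n = -1 ∨ ((a : Nat) : Int) ≤ fdv tl n) := by omega
      simp [h4]
      omega

theorem Fnd_succ (tl : List Char) (names : List String) (a : Nat) :
    Fnd tl names (a + 1) = Fnd tl names a ++ names.filter (fun n => decide (fdv tl n = (a : Int))) := by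
  unfold Fnd
  rw [List.range_succ, List.flatMap_append]
  simp

theorem Rem_empty_mono (tl : List Char) (names : List String) (a k : Nat) (hak : a ≤ k)
    (h : Rem tl names a = []) : Rem tl names k = [] := by
  unfold Rem at h ⊢
  rw [List.filter_eq_nil_iff] at h ⊢
  intro n hn hk
  apply h n hn
  simp only [decide_eq_true_eq] at hk ⊢
  omega

theorem Fnd_of_Rem_empty (tl : List Char) (names : List String) (a b : Nat)
    (h : Rem tl names a = []) : Fnd tl names (a + b) = Fnd tl names a := by
  unfold Rem at h
  rw [List.filter_eq_nil_iff] at h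
  unfold Fnd
  rw [List.range_add, List.flatMap_append]
  have hnil : List.flatMap (fun (j : Nat) => names.filter (fun n => decide (fdv tl n = (j : Int))))
      ((List.range b).map (fun x => a + x)) = [] := by
    rw [List.flatMap_eq_nil_iff]
    intro j hj
    rw [List.filter_eq_nil_iff]
    intro n hn hf
    rcases List.mem_map.1 hj with ⟨x, _, hx⟩
    apply h n hn
    simp only [decide_eq_true_eq] at hf ⊢
    omega
  rw [hnil, List.append_nil]

theorem altScan_spec (tl : List Char) (names : List String) :
    ∀ (b a : Nat),
      altScan tl (List.range' a b) (Fnd tl names a, Rem tl names a)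
        = (Fnd tl names (a + b), Rem tl names (a + b)) := by
  intro b
  induction b with
  | zero =>
      intro a
      simp [altScan]
  | succ b ih =>
      intro a
      rw [List.range'_succ]
      by_cases h : Rem tl names a = []
      · have h1 : Fnd tl names (a + (b + 1)) = Fnd tl names a := Fnd_of_Rem_empty tl names a (b + 1) h
        have h2 : Rem tl names (a + (b + 1)) = [] := Rem_empty_mono tl names a (a + (b + 1)) (by omega) h
        simp [altScan, h, h1, h2]
      · simp only [altScan, h]
        rw [foldl_partition, filter_start_eq, filter_nostart_eq, ← Fnd_succ]
        have := ih (a + 1)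
        rw [show a + 1 + b = a + (b + 1) by omega] at this
        exact this

theorem Rem_zero (tl : List Char) (names : List String) : Rem tl names 0 = names := by
  unfold Rem
  rw [List.filter_eq_self]
  intro n _
  have := PySem.Chars.neg_one_le_find tl n.toList
  simp only [decide_eq_true_eq]
  unfold fdv
  omega

theorem mem_Fnd (tl : List Char) (names : List String) (k : Nat) (x : String) :
    x ∈ Fnd tl names k ↔ x ∈ names ∧ ∃ j : Nat, j < k ∧ fdv tl x = (j : Int) := by
  unfold Fnd
  constructor
  · intro hx
    rcases List.mem_flatMap.1 hx with ⟨j, hj, hmem⟩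
    rcases List.mem_filter.1 hmem with ⟨hxn, hf⟩
    exact ⟨hxn, j, List.mem_range.1 hj, of_decide_eq_true hf⟩
  · rintro ⟨hxn, j, hj, hf⟩
    exact List.mem_flatMap.2 ⟨j, List.mem_range.2 hj, List.mem_filter.2 ⟨hxn, decide_eq_true hf⟩⟩

theorem mem_Rem_last (tl : List Char) (names : List String) (x : String) :
    x ∈ Rem tl names (tl.length + 1) ↔ x ∈ names ∧ fdv tl x = -1 := by
  unfold Rem
  simp only [List.mem_filter, decide_eq_true_eq]
  constructor
  · rintro ⟨hx, h | h⟩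
    · exact ⟨hx, h⟩
    · have hle := PySem.Chars.find_le_length tl x.toList
      unfold fdv at h
      omega
  · rintro ⟨hx, h⟩; exact ⟨hx, Or.inl h⟩

theorem Fnd_zero (tl : List Char) (names : List String) : Fnd tl names 0 = [] := by
  unfold Fnd; simp

theorem nodup_Fnd (tl : List Char) (names : List String) (hnd : names.Nodup) (k : Nat) :
    (Fnd tl names k).Nodup := by
  induction k with
  | zero => rw [Fnd_zero]; exact List.nodup_nil
  | succ a ih =>
      rw [Fnd_succ]
      refine List.Nodup.append ih (hnd.filter _) ?_
      intro x hx hx2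
      rcases (mem_Fnd tl names a x).1 hx with ⟨_, j, hj, hf⟩
      rcases List.mem_filter.1 hx2 with ⟨_, hf2⟩
      have := of_decide_eq_true hf2
      omega

theorem disjoint_Fnd_Rem (tl : List Char) (names : List String) (x : String)
    (hx : x ∈ Fnd tl names (tl.length + 1)) : x ∉ Rem tl names (tl.length + 1) := by
  intro hx2
  rcases (mem_Fnd tl names _ x).1 hx with ⟨_, j, hj, hf⟩
  have := (mem_Rem_last tl names x).1 hx2
  omega

theorem nodup_FndRem (tl : List Char) (names : List String) (hnd : names.Nodup) :
    (Fnd tl names (tl.length + 1) ++ Rem tl names (tl.length + 1)).Nodup :=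
  List.Nodup.append (nodup_Fnd tl names hnd _) (hnd.filter _)
    (disjoint_Fnd_Rem tl names)

theorem mem_FndRem (tl : List Char) (names : List String) (x : String) :
    x ∈ Fnd tl names (tl.length + 1) ++ Rem tl names (tl.length + 1) ↔ x ∈ names := by
  rw [List.mem_append, mem_Fnd, mem_Rem_last]
  constructor
  · rintro (⟨hx, _⟩ | ⟨hx, _⟩) <;> exact hx
  · intro hx
    by_cases h : fdv tl x = -1
    · exact Or.inr ⟨hx, h⟩
    · rcases fdv_le_length tl x h with ⟨h0, hle⟩
      refine Or.inl ⟨hx, (fdv tl x).toNat, by omega, by omega⟩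

theorem pairwise_idxv (names : List String) (hnd : names.Nodup) :
    names.Pairwise (fun a b => idxv names a < idxv names b) := by
  rw [List.pairwise_iff_getElem]
  intro i j hi hj hij
  unfold idxv
  have h1 := List.Nodup.idxOf_getElem hnd i hi
  have h2 := List.Nodup.idxOf_getElem hnd j hj
  omega

theorem idxv_bounds (names : List String) (n : String) (hn : n ∈ names) :
    0 ≤ idxv names n ∧ idxv names n < (names.length : Int) := by
  unfold idxv
  have := List.idxOf_lt_length_of_mem hn
  omega

theorem key2_lt_iff (tl : List Char) (names : List String) (x y : String)
    (hx : x ∈ names) (hy : y ∈ names) (hidx : idxv names y < idxv names x) :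
    (key2 tl names x < key2 tl names y ↔ pval tl x < pval tl y) := by
  rcases idxv_bounds names x hx with ⟨hx0, hx1⟩
  rcases idxv_bounds names y hy with ⟨hy0, hy1⟩
  unfold key2
  set K : Int := (names.length : Int) + 1 with hK
  have hKpos : 0 < K := by omega
  constructor
  · intro h
    by_contra hc
    have hle : pval tl y ≤ pval tl x := by omega
    have := mul_le_mul_of_nonneg_right hle (le_of_lt hKpos)
    omega
  · intro h
    have hle : pval tl x + 1 ≤ pval tl y := by omega
    have := mul_le_mul_of_nonneg_right hle (le_of_lt hKpos)
    have hexp : (pval tl x + 1) * K = pval tl x * K + K := by ring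
    omega

theorem key2_lt_of_pval_lt (tl : List Char) (names : List String) (x y : String)
    (hx : x ∈ names) (hy : y ∈ names) (h : pval tl x < pval tl y) :
    key2 tl names x < key2 tl names y := by
  rcases idxv_bounds names x hx with ⟨hx0, hx1⟩
  rcases idxv_bounds names y hy with ⟨hy0, hy1⟩
  unfold key2
  set K : Int := (names.length : Int) + 1 with hK
  have hKpos : 0 < K := by omega
  have hle : pval tl x + 1 ≤ pval tl y := by omega
  have := mul_le_mul_of_nonneg_right hle (le_of_lt hKpos)
  have hexp : (pval tl x + 1) * K = pval tl x * K + K := by ring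
  omega

theorem key2_lt_of_pval_eq (tl : List Char) (names : List String) (x y : String)
    (h : pval tl x = pval tl y) (hidx : idxv names x < idxv names y) :
    key2 tl names x < key2 tl names y := by
  unfold key2
  rw [h]
  omega

theorem pval_of_fdv_nat (tl : List Char) (n : String) (j : Nat) (h : fdv tl n = (j : Int)) :
    pval tl n = (j : Int) := by
  unfold pval
  rw [if_pos (by omega)]
  exact h

theorem pval_of_fdv_neg (tl : List Char) (n : String) (h : fdv tl n = -1) :
    pval tl n = (tl.length : Int) + 1 := by
  unfold pval
  rw [if_neg (by omega)]

theorem pval_le_length (tl : List Char) (n : String) (h : fdv tl n ≠ -1) :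
    pval tl n ≤ (tl.length : Int) := by
  have := fdv_le_length tl n h
  unfold pval
  rw [if_pos h]
  exact this.2

theorem perm_Fnd_Rem (tl : List Char) (names : List String) (hnd : names.Nodup) :
    (Fnd tl names (tl.length + 1) ++ Rem tl names (tl.length + 1)).Perm names := by
  exact (List.perm_ext_iff_of_nodup (nodup_FndRem tl names hnd) hnd).2 (mem_FndRem tl names)

theorem pairwise_Fnd (tl : List Char) (names : List String) (hnd : names.Nodup) (k : Nat) :
    (Fnd tl names k).Pairwise (fun a b => key2 tl names a < key2 tl names b) := by
  induction k with
  | zero => rw [Fnd_zero]; exact List.Pairwise.nil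
  | succ a ih =>
      rw [Fnd_succ, List.pairwise_append]
      refine ⟨ih, ?_, ?_⟩
      · refine List.Pairwise.imp_of_mem ?_ ((pairwise_idxv names hnd).filter _)
        intro x y hx hy hxy
        rcases List.mem_filter.1 hx with ⟨hxn, hfx⟩
        rcases List.mem_filter.1 hy with ⟨hyn, hfy⟩
        exact key2_lt_of_pval_eq tl names x y
          (by rw [pval_of_fdv_nat tl x a (of_decide_eq_true hfx),
                  pval_of_fdv_nat tl y a (of_decide_eq_true hfy)]) hxy
      · intro x hx y hy
        rcases (mem_Fnd tl names a x).1 hx with ⟨hxn, j, hj, hfx⟩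
        rcases List.mem_filter.1 hy with ⟨hyn, hfy⟩
        refine key2_lt_of_pval_lt tl names x y hxn hyn ?_
        rw [pval_of_fdv_nat tl x j hfx, pval_of_fdv_nat tl y a (of_decide_eq_true hfy)]
        omega

theorem pairwise_key2 (tl : List Char) (names : List String) (hnd : names.Nodup) :
    (Fnd tl names (tl.length + 1) ++ Rem tl names (tl.length + 1)).Pairwise
      (fun a b => key2 tl names a < key2 tl names b) := by
  rw [List.pairwise_append]
  refine ⟨pairwise_Fnd tl names hnd _, ?_, ?_⟩
  · refine List.Pairwise.imp_of_mem ?_ ((pairwise_idxv names hnd).filter _)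
    intro x y hx hy hxy
    have hx2 := (mem_Rem_last tl names x).1 hx
    have hy2 := (mem_Rem_last tl names y).1 hy
    exact key2_lt_of_pval_eq tl names x y
      (by rw [pval_of_fdv_neg tl x hx2.2, pval_of_fdv_neg tl y hy2.2]) hxy
  · intro x hx y hy
    rcases (mem_Fnd tl names _ x).1 hx with ⟨hxn, j, hj, hfx⟩
    have hy2 := (mem_Rem_last tl names y).1 hy
    refine key2_lt_of_pval_lt tl names x y hxn hy2.1 ?_
    rw [pval_of_fdv_nat tl x j hfx, pval_of_fdv_neg tl y hy2.2]
    omega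

theorem sortedA_eq (tl : List Char) (names : List String) (hnd : names.Nodup)
    (g : String → Option Int)
    (hg : ∀ n ∈ names, g n = if fdv tl n ≠ -1 then some (fdv tl n) else none) :
    PySem.List.sorted2 names (fun n => if g n = none then (1 : Int) else 0)
        (fun n => (g n).getD 0) false
      = PySem.List.sorted names (key2 tl names) false := by
  rw [PySem.List.sorted_eq_foldl_insertBy]
  have h1 : PySem.List.sorted2 names (fun n => if g n = none then (1 : Int) else 0)
      (fun n => (g n).getD 0) false
      = names.foldl (fun acc x => PySem.List.insertBy
          (fun a b => decide ((if g a = none then (1 : Int) else 0) < (if g b = none then (1 : Int) else 0)) ||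
            (!decide ((if g b = none then (1 : Int) else 0) < (if g a = none then (1 : Int) else 0)) &&
              decide ((g a).getD 0 < (g b).getD 0))) x acc) [] := rfl
  rw [h1]
  refine foldl_insertBy_congr _ _ names [] (by intro x _ y hy; cases hy) ?_
  refine List.Pairwise.imp_of_mem ?_ (pairwise_idxv names hnd)
  intro a b ha hb hab
  show (decide ((if g b = none then (1 : Int) else 0) < (if g a = none then (1 : Int) else 0)) ||
          (!decide ((if g a = none then (1 : Int) else 0) < (if g b = none then (1 : Int) else 0)) &&
            decide ((g b).getD 0 < (g a).getD 0)))
        = decide (key2 tl names b < key2 tl names a)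
  have hkey : decide (key2 tl names b < key2 tl names a) = decide (pval tl b < pval tl a) :=
    by rw [decide_eq_decide]; exact key2_lt_iff tl names b a hb ha hab
  rw [hkey, hg a ha, hg b hb]
  by_cases hfb : fdv tl b = -1 <;> by_cases hfa : fdv tl a = -1
  · rw [pval_of_fdv_neg tl b hfb, pval_of_fdv_neg tl a hfa]
    simp [hfb, hfa]
  · have h2 := pval_le_length tl a hfa
    rw [pval_of_fdv_neg tl b hfb]
    simp [hfb, hfa]
    omega
  · have h2 := pval_le_length tl b hfb
    rw [pval_of_fdv_neg tl a hfa]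
    simp [hfb, hfa]
    omega
  · have hpb : pval tl b = fdv tl b := by unfold pval; rw [if_pos hfb]
    have hpa : pval tl a = fdv tl a := by unfold pval; rw [if_pos hfa]
    rw [hpb, hpa]
    simp [hfb, hfa]

theorem enumerate_shift (xs : List String) :
    ∀ s : Int, (PySem.List.enumerate xs s).map (fun p => (p.2, p.1 + 1))
      = (PySem.List.enumerate xs (s + 1)).map (fun p => (p.2, p.1)) := by
  induction xs with
  | nil => intro s; rfl
  | cons x t ih =>
      intro s
      rw [PySem.List.enumerate_cons, PySem.List.enumerate_cons, List.map_cons, List.map_cons, ih (s + 1)]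

theorem map_pair_const (xs : List String) : ∀ (s c : Int),
    (PySem.List.enumerate xs s).map (fun p => (p.2, c)) = xs.map (fun n => (n, c)) := by
  induction xs with
  | nil => intro s c; rfl
  | cons x t ih =>
      intro s c
      rw [PySem.List.enumerate_cons, List.map_cons, List.map_cons, ih (s + 1)]

theorem main_eq (text : String) (product_names : List String) :
    rank_products text product_names = rank_products_alt text product_names := by
  unfold rank_products rank_products_alt
  simp only [PySem.Str.find_eq]
  have hnd : (PySem.List.dedup product_names).Nodup := PySem.List.nodup_dedup product_names
  set tl := text.toList with htl
  set names := PySem.List.dedup product_names with hnames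
  set pd := product_names.foldl (fun d name =>
      d.insert name (if PySem.Chars.find tl name.toList ≠ -1 then
        some (PySem.Chars.find tl name.toList) else none)) PySem.Dict.empty with hpd
  -- keys of the position dict
  have hkeys : pd.keys = names := by
    rw [hpd, PySem.Dict.keys_foldl_insert product_names
      (fun _ name => if PySem.Chars.find tl name.toList ≠ -1 then
        some (PySem.Chars.find tl name.toList) else none) PySem.Dict.empty]
    rw [PySem.Dict.keys_empty, PySem.Set.update_nil_left, hnames, PySem.List.dedup_eq_ofList]
  -- values of the position dict
  have hget : ∀ n ∈ names, pd.getD n none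
      = if fdv tl n ≠ -1 then some (fdv tl n) else none := by
    intro n hn
    rw [hpd, getD_foldl_insert_valfun product_names
      (fun name => if PySem.Chars.find tl name.toList ≠ -1 then
        some (PySem.Chars.find tl name.toList) else none) none PySem.Dict.empty n]
    rw [if_pos ((PySem.List.mem_dedup product_names n).1 (hnames ▸ hn))]
    rfl
  -- the sorted list is the sweep order
  have hsortP : PySem.List.sorted names (key2 tl names) false
      = Fnd tl names (tl.length + 1) ++ Rem tl names (tl.length + 1) :=
    PySem.List.sorted_eq_of_perm_of_pairwise_lt names _ (key2 tl names)
      (perm_Fnd_Rem tl names hnd) (pairwise_key2 tl names hnd)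
  have hsort : PySem.List.sorted2 pd.keys
      (fun n => if pd.getD n none = none then (1 : Int) else 0)
      (fun n => (pd.getD n none).getD 0) false
      = Fnd tl names (tl.length + 1) ++ Rem tl names (tl.length + 1) := by
    rw [hkeys, sortedA_eq tl names hnd (fun n => pd.getD n none) hget, hsortP]
  rw [hsort]
  set F := Fnd tl names (tl.length + 1) with hF
  set R := Rem tl names (tl.length + 1) with hR
  have hndFR : (F ++ R).Nodup := nodup_FndRem tl names hnd
  have hlenFR : (F ++ R).length = names.length := (perm_Fnd_Rem tl names hnd).length_eq
  -- the sweep reaches exactly (F, R)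
  have hscan : altScan tl (List.range (tl.length + 1)) ([], names) = (F, R) := by
    rw [List.range_eq_range']
    have h := altScan_spec tl names (tl.length + 1) 0
    rw [Fnd_zero, Rem_zero] at h
    simpa using h
  rw [hscan]
  dsimp only
  -- A's ranks dict: a loop over fresh distinct keys
  have hfreshA : ∀ p ∈ PySem.List.enumerate (F ++ R) 0, (PySem.Dict.empty : PySem.Dict String Int).contains p.2 = false := by
    intro p _; exact PySem.Dict.contains_empty p.2
  have hndA : ((PySem.List.enumerate (F ++ R) 0).map (fun p => p.2)).Nodup := by
    rw [PySem.List.map_snd_enumerate]; exact hndFR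
  rw [PySem.Dict.items_foldl_insert_fresh (PySem.List.enumerate (F ++ R) 0)
    (fun p => p.2)
    (fun p => if pd.getD p.2 none ≠ none then p.1 + 1 else ((F ++ R).length : Int) + 1)
    PySem.Dict.empty hfreshA hndA]
  -- B's first ranks dict
  have hfreshB : ∀ p ∈ PySem.List.enumerate F 1, (PySem.Dict.empty : PySem.Dict String Int).contains p.2 = false := by
    intro p _; exact PySem.Dict.contains_empty p.2
  have hndB : ((PySem.List.enumerate F 1).map (fun p => p.2)).Nodup := by
    rw [PySem.List.map_snd_enumerate]; exact hndFR.of_append_left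
  -- B's sentinel loop: all keys fresh for the first dict
  have hkeys1 : (List.foldl (fun d p => d.insert p.2 p.1) PySem.Dict.empty (PySem.List.enumerate F 1)).keys
      = PySem.Set.ofList F := by
    rw [PySem.Dict.keys_foldl_insert_key (PySem.List.enumerate F 1) (fun p => p.2) (fun _ p => p.1) PySem.Dict.empty]
    rw [PySem.Dict.keys_empty, PySem.List.map_snd_enumerate, PySem.Set.update_nil_left]
  have hfreshS : ∀ n ∈ R, (List.foldl (fun d p => d.insert p.2 p.1) PySem.Dict.empty (PySem.List.enumerate F 1)).contains n = false := by
    intro n hn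
    rw [PySem.Dict.contains_eq_decide_mem_keys, hkeys1]
    rw [decide_eq_false_iff_not, PySem.Set.mem_ofList]
    intro hmem
    exact disjoint_Fnd_Rem tl names n hmem hn
  have hndS : (R.map (fun n => n)).Nodup := by
    rw [List.map_id']; exact hnd.filter _
  rw [PySem.Dict.items_foldl_insert_fresh R (fun n => n) (fun _ => (names.length : Int) + 1)
    _ hfreshS hndS]
  rw [PySem.Dict.items_foldl_insert_fresh (PySem.List.enumerate F 1)
    (fun p => p.2) (fun p => p.1) PySem.Dict.empty hfreshB hndB]
  -- both sides are now explicit lists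
  rw [PySem.List.enumerate_append, List.map_append]
  have hie : (PySem.Dict.empty : PySem.Dict String Int).items = [] := rfl
  simp only [hie, List.nil_append]
  congr 1
  · -- found names: ranks 1..|F|
    have h1 : ∀ p ∈ PySem.List.enumerate F 0,
        ((fun p => ((fun (q : Int × String) => q.2) p, (fun (q : Int × String) => if pd.getD q.2 none ≠ none then q.1 + 1 else ((F ++ R).length : Int) + 1) p)) p)
          = (fun (q : Int × String) => (q.2, q.1 + 1)) p := by
      intro p hp
      rcases (PySem.List.mem_enumerate_iff F 0 p).1 hp with ⟨k, hk, hpk⟩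
      have hmemF : p.2 ∈ F := by rw [hpk]; exact List.getElem_mem hk
      rcases (mem_Fnd tl names _ p.2).1 hmemF with ⟨hmn, j, hj, hfj⟩
      have : pd.getD p.2 none ≠ none := by
        rw [hget p.2 hmn, if_pos (by omega)]
        exact Option.some_ne_none _
      simp only [this, if_pos, ne_eq, not_false_iff]
    rw [List.map_congr_left h1, enumerate_shift F 0]
    norm_num
  · -- missing names: the sentinel rank
    have h2 : ∀ p ∈ PySem.List.enumerate R (0 + (F.length : Int)),
        ((fun p => ((fun (q : Int × String) => q.2) p, (fun (q : Int × String) => if pd.getD q.2 none ≠ none then q.1 + 1 else ((F ++ R).length : Int) + 1) p)) p)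
          = (fun (q : Int × String) => (q.2, ((F ++ R).length : Int) + 1)) p := by
      intro p hp
      rcases (PySem.List.mem_enumerate_iff R _ p).1 hp with ⟨k, hk, hpk⟩
      have hmemR : p.2 ∈ R := by rw [hpk]; exact List.getElem_mem hk
      have hfneg := ((mem_Rem_last tl names p.2).1 hmemR).2
      have hmn := ((mem_Rem_last tl names p.2).1 hmemR).1
      have hnone : pd.getD p.2 none = none := by
        rw [hget p.2 hmn, if_neg (by omega)]
      simp [hnone]
    rw [List.map_congr_left h2, map_pair_const, hlenFR]

-- ===== VERDICT (by name: the statement is the Claim_ definition above) =====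
theorem rank_products_spec : Claim_equal_rank_products := by
  intro text product_names _
  unfold Spec_rank_products
  exact main_eq text product_names
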